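-- pv_equiv track=rewrite | github.com/AshSiva17/Codes | 1MD3/1MD3 Practise/week_4_practise.py | capitalize_alternate_words
-- ===== SOURCE A (Python) =====
-- def capitalize_alternate_words(string: str) -> str:
--
--         new = ''
--         count = 2
--
--         for char in string:
--              if count %2 == 0:
--                      new += char.lower()
--              else:
--                      new += char.upper()
--              if char == ' ':
--                      count += 1
--
--         return new
-- ===== SOURCE B (Python) =====
-- def capitalize_alternate_words(string: str) -> str:
--     words = string.split(' ')
--     return ' '.join(w.lower() if i % 2 == 0 else w.upper()
--                     for i, w in enumerate(words))
-- ===== Notes on version B (the rewrite author's own statement) =====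
-- stated objective: idiomatic
-- what changed: Replaces the char-by-char loop with a running space counter by a single-space split, a per-word case map keyed on word index parity, and a join.
import Mathlib
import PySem

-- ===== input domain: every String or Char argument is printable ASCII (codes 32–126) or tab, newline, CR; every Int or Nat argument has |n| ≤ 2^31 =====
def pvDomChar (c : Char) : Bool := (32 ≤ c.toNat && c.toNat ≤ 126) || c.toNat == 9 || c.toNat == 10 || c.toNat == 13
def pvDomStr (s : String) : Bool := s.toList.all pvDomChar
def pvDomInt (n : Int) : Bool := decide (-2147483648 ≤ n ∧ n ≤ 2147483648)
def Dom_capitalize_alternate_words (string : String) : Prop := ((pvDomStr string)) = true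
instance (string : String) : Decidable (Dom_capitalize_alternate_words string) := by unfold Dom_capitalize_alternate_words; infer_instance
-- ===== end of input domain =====

-- B idiomatic rewrite: split(' ') + per-word case by index parity + ' '.join, instead of A's
-- char loop with a running space count. Equivalence of return values is proved for all strings.

-- ===== PORT A =====
-- the loop body of A: accumulate the cased char, bump count after a space
def pvStepA (st : List Char × Int) (c : Char) : List Char × Int :=
  (st.1 ++ (if PySem.Int.mod st.2 2 == 0 then [PySem.Chars.lowerChar c] else [PySem.Chars.upperChar c]),
   if c == ' ' then st.2 + 1 else st.2)

def capitalize_alternate_words (string : String) : String :=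
  String.mk ((string.toList.foldl pvStepA ([], (2 : Int))).1)

-- ===== PORT B =====
def capitalize_alternate_words_alt (string : String) : String :=
  let words := PySem.Chars.splitOn string.toList [' ']
  String.mk (PySem.Chars.join [' ']
    ((PySem.List.enumerate words).map
      (fun p => if PySem.Int.mod p.1 2 == 0 then PySem.Chars.lower p.2 else PySem.Chars.upper p.2)))

-- ===== PRECONDITION & SPEC =====
def Spec_capitalize_alternate_words (string : String) (out : String) : Prop := out = capitalize_alternate_words_alt string
instance (string : String) (out : String) : Decidable (Spec_capitalize_alternate_words string out) := by unfold Spec_capitalize_alternate_words; infer_instance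

-- ===== CLAIM (what is proved, stated in full; the proofs are below) =====
def Claim_equal_capitalize_alternate_words : Prop := ∀ (string : String), Dom_capitalize_alternate_words string → Spec_capitalize_alternate_words string (capitalize_alternate_words string)

-- ===== LEMMAS AND PROOFS =====

-- the accumulator-free form of A's loop
def pvRunA (p : Int) : List Char → List Char
  | [] => []
  | c :: cs =>
      (if PySem.Int.mod p 2 == 0 then PySem.Chars.lowerChar c else PySem.Chars.upperChar c)
        :: pvRunA (if c == ' ' then p + 1 else p) cs

theorem pvFoldA_eq (cs : List Char) : ∀ (acc : List Char) (p : Int),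
    (cs.foldl pvStepA (acc, p)).1 = acc ++ pvRunA p cs := by
  induction cs with
  | nil => intro acc p; simp [pvRunA]
  | cons c cs ih =>
      intro acc p
      simp only [List.foldl_cons, pvStepA, pvRunA, ih]
      split <;> simp

-- structural characterisation of split on a single space
def pvSp : List Char → List (List Char)
  | [] => [[]]
  | c :: cs => if c == ' ' then [] :: pvSp cs else (pvSp cs).modifyHead (c :: ·)

theorem pvSp_ne_nil (cs : List Char) : pvSp cs ≠ [] := by
  cases cs with
  | nil => simp [pvSp]
  | cons c cs =>
      simp only [pvSp]
      split
      · simp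
      · cases h : pvSp cs with
        | nil => exact absurd h (pvSp_ne_nil cs)
        | cons w ws => simp [List.modifyHead]

theorem pvSp_space (cs : List Char) : pvSp (' ' :: cs) = [] :: pvSp cs := by simp [pvSp]

theorem pvSp_nonspace (c : Char) (cs : List Char) (h : c ≠ ' ') :
    pvSp (c :: cs) = (pvSp cs).modifyHead (c :: ·) := by
  simp only [pvSp]
  rw [if_neg (by simp [h])]

theorem pvGo_eq (fuel : Nat) : ∀ (l cur : List Char) (acc : List (List Char)),
    l.length ≤ fuel →
    PySem.Chars.splitOn.go [' '] fuel l cur acc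
      = acc.reverse ++ (pvSp l).modifyHead (cur.reverse ++ ·) := by
  induction fuel with
  | zero =>
      intro l cur acc h
      have : l = [] := List.eq_nil_of_length_eq_zero (Nat.le_zero.mp h)
      subst this
      simp [PySem.Chars.splitOn.go, pvSp, List.modifyHead]
  | succ fuel ih =>
      intro l cur acc h
      cases l with
      | nil => simp [PySem.Chars.splitOn.go, pvSp, List.modifyHead]
      | cons c rest =>
          simp only [PySem.Chars.splitOn.go]
          by_cases hc : c = ' '
          · subst hc
            have hpre : [' '].isPrefixOf (' ' :: rest) = true := by
              simp [List.isPrefixOf]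
            rw [if_pos hpre]
            have hgo := ih rest [] (List.reverse cur :: acc) (by simpa using Nat.le_of_succ_le_succ h)
            simp only [List.length_singleton, List.drop_one, List.tail_cons] at hgo ⊢
            rw [hgo, pvSp_space]
            cases hsp : pvSp rest with
            | nil => exact absurd hsp (pvSp_ne_nil rest)
            | cons w ws => simp [List.modifyHead]
          · have hpre : [' '].isPrefixOf (c :: rest) = false := by
              simp [List.isPrefixOf]
              exact fun e => hc e.symm
            rw [if_neg (by simp [hpre])]
            rw [ih rest (c :: cur) acc (by simpa using Nat.le_of_succ_le_succ h)]
            rw [pvSp_nonspace c rest hc]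
            cases hsp : pvSp rest with
            | nil => exact absurd hsp (pvSp_ne_nil rest)
            | cons w ws => simp [List.modifyHead]

theorem pvSplitOn_eq (cs : List Char) : PySem.Chars.splitOn cs [' '] = pvSp cs := by
  rw [PySem.Chars.splitOn, pvGo_eq (cs.length + 1) cs [] [] (Nat.le_succ _)]
  cases h : pvSp cs with
  | nil => exact absurd h (pvSp_ne_nil cs)
  | cons w ws => simp [List.modifyHead]

theorem pvJoin_cons_cons (x : Char) (h : List Char) (rest : List (List Char)) :
    PySem.Chars.join [' '] ((x :: h) :: rest) = x :: PySem.Chars.join [' '] (h :: rest) := by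
  cases rest with
  | nil => simp [PySem.Chars.join, List.intercalate]
  | cons r t => simp [PySem.Chars.join, List.intercalate]

theorem pvRunA_space (p : Int) (cs : List Char) : pvRunA p (' ' :: cs) = ' ' :: pvRunA (p + 1) cs := by
  simp only [pvRunA]
  rw [show (if (' ' == ' ') = true then p + 1 else p) = p + 1 from if_pos rfl]
  congr 1
  split <;> decide

theorem pvRunA_nonspace (p : Int) (c : Char) (cs : List Char) (h : c ≠ ' ') :
    pvRunA p (c :: cs)
      = (if PySem.Int.mod p 2 == 0 then PySem.Chars.lowerChar c else PySem.Chars.upperChar c) :: pvRunA p cs := by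
  simp only [pvRunA]
  rw [show (if (c == ' ') = true then p + 1 else p) = p from if_neg (by simp [h])]

theorem pvJoin_nil_cons (h : List Char) (rest : List (List Char)) :
    PySem.Chars.join [' '] (([] : List Char) :: h :: rest) = ' ' :: PySem.Chars.join [' '] (h :: rest) := by
  simp [PySem.Chars.join, List.intercalate]

theorem pvModEq (i p : Int) (h : PySem.Int.mod i 2 = PySem.Int.mod p 2) :
    PySem.Int.mod (i + 1) 2 = PySem.Int.mod (p + 1) 2 := by
  simp only [PySem.Int.mod_eq_emod_of_pos (b := 2) (by norm_num)] at h ⊢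
  omega

theorem pvCaseNil (i : Int) :
    (if PySem.Int.mod i 2 == 0 then PySem.Chars.lower [] else PySem.Chars.upper []) = ([] : List Char) := by
  split <;> simp [PySem.Chars.lower, PySem.Chars.upper]

theorem pvMain (cs : List Char) : ∀ (i p : Int),
    PySem.Int.mod i 2 = PySem.Int.mod p 2 →
    PySem.Chars.join [' ']
      ((PySem.List.enumerate (pvSp cs) i).map
        (fun q => if PySem.Int.mod q.1 2 == 0 then PySem.Chars.lower q.2 else PySem.Chars.upper q.2))
      = pvRunA p cs := by
  induction cs with
  | nil =>
      intro i p _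
      simp only [pvSp, PySem.List.enumerate, List.map, pvRunA, pvCaseNil]
      simp [PySem.Chars.join, List.intercalate]
  | cons c cs ih =>
      intro i p h
      by_cases hc : c = ' '
      · subst hc
        rw [pvSp_space, pvRunA_space]
        cases hsp : pvSp cs with
        | nil => exact absurd hsp (pvSp_ne_nil cs)
        | cons w ws =>
            have hrec := ih (i + 1) (p + 1) (pvModEq i p h)
            rw [hsp] at hrec
            simp only [PySem.List.enumerate, List.map, pvCaseNil] at hrec ⊢
            rw [pvJoin_nil_cons, hrec]
      · rw [pvSp_nonspace c cs hc, pvRunA_nonspace p c cs hc]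
        cases hsp : pvSp cs with
        | nil => exact absurd hsp (pvSp_ne_nil cs)
        | cons w ws =>
            have hrec := ih i p h
            rw [hsp] at hrec
            simp only [List.modifyHead, PySem.List.enumerate, List.map] at hrec ⊢
            have hhead : (if PySem.Int.mod i 2 == 0 then PySem.Chars.lower (c :: w) else PySem.Chars.upper (c :: w))
                = (if PySem.Int.mod p 2 == 0 then PySem.Chars.lowerChar c else PySem.Chars.upperChar c)
                  :: (if PySem.Int.mod i 2 == 0 then PySem.Chars.lower w else PySem.Chars.upper w) := by
              rw [h]
              split <;> simp [PySem.Chars.lower, PySem.Chars.upper]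
            rw [hhead, pvJoin_cons_cons, hrec]

-- ===== VERDICT (by name: the statement is the Claim_ definition above) =====
theorem capitalize_alternate_words_spec : Claim_equal_capitalize_alternate_words := by
  intro s _
  unfold Spec_capitalize_alternate_words capitalize_alternate_words capitalize_alternate_words_alt
  simp only [pvFoldA_eq, pvSplitOn_eq, List.nil_append]
  rw [pvMain s.toList 0 2 (by decide)]
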